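-- pv_equiv track=rewrite | github.com/matel2394/project | Python.git/Cos Pro 2/빈칸 채우기 모의고사/문제 12.py | solution
-- ===== SOURCE A (Python) =====
-- def solution(money, chairs, desks):
--     answer = 0
--     for chair in chairs:
--         for desk in desks:
--             price = chair + desk
--             if answer <= price and price <= money:
--                 answer = price
--     return answer
-- ===== SOURCE B (Python) =====
-- def solution(money, chairs, desks):
--     ds = sorted(desks)
--     best = 0
--     for c in chairs:
--         limit = money - c
--         lo, hi = 0, len(ds)
--         while lo < hi:
--             mid = (lo + hi) // 2
--             if ds[mid] <= limit:
--                 lo = mid + 1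
--             else:
--                 hi = mid
--         if lo > 0:
--             p = c + ds[lo - 1]
--             if best < p:
--                 best = p
--     return best
-- ===== Notes on version B (the rewrite author's own statement) =====
-- stated objective: faster
-- what changed: Replaces the nested chair x desk scan by sorting the desks once and binary-searching, for each chair, the largest desk price that still fits the budget.
import Mathlib
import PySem

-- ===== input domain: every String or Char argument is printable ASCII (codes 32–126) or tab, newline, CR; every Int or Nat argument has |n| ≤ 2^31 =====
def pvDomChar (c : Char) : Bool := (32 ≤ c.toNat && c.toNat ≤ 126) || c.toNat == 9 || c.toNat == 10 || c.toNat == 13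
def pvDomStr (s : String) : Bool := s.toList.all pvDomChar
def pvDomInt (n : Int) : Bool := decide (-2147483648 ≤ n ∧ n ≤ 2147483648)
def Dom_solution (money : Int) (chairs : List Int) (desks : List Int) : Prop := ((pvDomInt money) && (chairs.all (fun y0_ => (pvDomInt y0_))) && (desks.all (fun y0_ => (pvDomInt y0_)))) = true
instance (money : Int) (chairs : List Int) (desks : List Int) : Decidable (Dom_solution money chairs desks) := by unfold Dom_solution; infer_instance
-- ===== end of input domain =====

-- B sorts the desks once and binary-searches the best affordable desk per chair
-- instead of A's nested chair x desk scan (objective: faster, asymptotic).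


-- ===== PORT A =====
def solution (money : Int) (chairs : List Int) (desks : List Int) : Int :=
  chairs.foldl (fun answer chair =>
    desks.foldl (fun answer desk =>
      let price := chair + desk
      if answer ≤ price ∧ price ≤ money then price else answer) answer) 0

-- ===== PORT B =====
-- hand-written binary search of Source B; ds.getD mid 0 is exact because lo ≤ mid < hi ≤ ds.length throughout
def bsearch (ds : List Int) (limit : Int) (lo hi : Nat) : Nat :=
  if _h : lo < hi then
    let mid := (lo + hi) / 2
    if ds.getD mid 0 ≤ limit then bsearch ds limit (mid + 1) hi
    else bsearch ds limit lo mid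
  else lo
termination_by hi - lo
decreasing_by all_goals omega

def solution_alt (money : Int) (chairs : List Int) (desks : List Int) : Int :=
  let ds := PySem.List.sorted desks (fun x => x) false
  chairs.foldl (fun best c =>
    let limit := money - c
    let lo := bsearch ds limit 0 ds.length
    if lo > 0 then
      let p := c + ds.getD (lo - 1) 0
      if best < p then p else best
    else best) 0

-- ===== PRECONDITION & SPEC =====
def Spec_solution (money : Int) (chairs : List Int) (desks : List Int) (out : Int) : Prop := out = solution_alt money chairs desks
instance (money : Int) (chairs : List Int) (desks : List Int) (out : Int) : Decidable (Spec_solution money chairs desks out) := by unfold Spec_solution; infer_instance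

-- ===== CLAIM (what is proved, stated in full; the proofs are below) =====
def Claim_equal_solution : Prop := ∀ (money : Int) (chairs : List Int) (desks : List Int), Dom_solution money chairs desks → Spec_solution money chairs desks (solution money chairs desks)

-- ===== LEMMAS AND PROOFS =====

-- a fold of max over a list all of whose elements are ≤ the initial value is the initial value
lemma foldl_max_le_init (l : List Int) (b : Int) (h : ∀ x ∈ l, x ≤ b) : l.foldl max b = b := by
  induction l generalizing b with
  | nil => rfl
  | cons x t ih =>
    have hx : x ≤ b := h x (by simp)
    simp only [List.foldl_cons, max_eq_left hx]
    exact ih b (fun y hy => h y (by simp [hy]))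

-- a fold of max over a list containing a dominating element m is max init m
lemma foldl_max_dom (l : List Int) (a m : Int) (hm : m ∈ l) (h : ∀ x ∈ l, x ≤ m) :
    l.foldl max a = max a m := by
  induction l generalizing a with
  | nil => cases hm
  | cons x t ih =>
    simp only [List.foldl_cons]
    rcases List.mem_cons.mp hm with rfl | hmt
    · have : ∀ y ∈ t, y ≤ max a m := fun y hy => le_trans (h y (by simp [hy])) (le_max_right _ _)
      exact foldl_max_le_init t (max a m) this
    · have hxm : x ≤ m := h x (by simp)
      rw [ih (max a x) hmt (fun y hy => h y (by simp [hy]))]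
      rcases le_total a x with h1 | h1 <;> rcases le_total a m with h2 | h2 <;>
        simp [max_def] <;> omega

-- monotone access into a ≤-sorted list
lemma getD_mono (ds : List Int) (hs : ds.Pairwise (fun a b => a ≤ b)) {i j : Nat}
    (hij : i ≤ j) (hj : j < ds.length) : ds.getD i 0 ≤ ds.getD j 0 := by
  have hi : i < ds.length := lt_of_le_of_lt hij hj
  rw [List.getD_eq_getElem _ _ hi, List.getD_eq_getElem _ _ hj]
  rcases lt_or_eq_of_le hij with h | rfl
  · exact List.pairwise_iff_getElem.mp hs i j hi hj h
  · exact le_refl _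

-- the binary search of Source B partitions [lo,hi) at the number of elements ≤ limit
lemma bsearch_spec (ds : List Int) (limit : Int) (hs : ds.Pairwise (fun a b => a ≤ b)) :
    ∀ (n lo hi : Nat), hi - lo ≤ n → lo ≤ hi → hi ≤ ds.length →
      lo ≤ bsearch ds limit lo hi ∧ bsearch ds limit lo hi ≤ hi ∧
      (∀ i, lo ≤ i → i < bsearch ds limit lo hi → ds.getD i 0 ≤ limit) ∧
      (∀ i, bsearch ds limit lo hi ≤ i → i < hi → limit < ds.getD i 0) := by
  intro n
  induction n with
  | zero =>
    intro lo hi hn hlh _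
    have : lo = hi := by omega
    subst this
    rw [bsearch, dif_neg (by omega)]
    exact ⟨le_refl _, le_refl _, fun i h1 h2 => by omega, fun i h1 h2 => by omega⟩
  | succ n ih =>
    intro lo hi hn hlh hhi
    by_cases h : lo < hi
    · rw [bsearch, dif_pos h]
      have hmidlo : lo ≤ (lo + hi) / 2 := by omega
      have hmidhi : (lo + hi) / 2 < hi := by omega
      by_cases hc : ds.getD ((lo + hi) / 2) 0 ≤ limit
      · simp only [if_pos hc]
        obtain ⟨r1, r2, r3, r4⟩ := ih ((lo + hi) / 2 + 1) hi (by omega) (by omega) hhi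
        refine ⟨by omega, r2, ?_, r4⟩
        intro i h1 h2
        by_cases hi2 : i ≤ (lo + hi) / 2
        · exact le_trans (getD_mono ds hs hi2 (by omega)) hc
        · exact r3 i (by omega) h2
      · simp only [if_neg hc]
        obtain ⟨r1, r2, r3, r4⟩ := ih lo ((lo + hi) / 2) (by omega) (by omega) (by omega)
        refine ⟨r1, by omega, r3, ?_⟩
        intro i h1 h2
        by_cases hi2 : i < (lo + hi) / 2
        · exact r4 i h1 hi2
        · exact lt_of_not_ge (fun hge => hc (le_trans (getD_mono ds hs (by omega : (lo+hi)/2 ≤ i) (by omega)) hge))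
    · rw [bsearch, dif_neg h]
      exact ⟨le_refl _, by omega, fun i h1 h2 => by omega, fun i h1 h2 => by omega⟩

-- A's inner loop is a fold of max over the affordable sums
lemma innerA_eq_filter (money c a : Int) (desks : List Int) :
    desks.foldl (fun answer desk =>
        let price := c + desk
        if answer ≤ price ∧ price ≤ money then price else answer) a
      = ((desks.filter (fun d => decide (c + d ≤ money))).map (fun d => c + d)).foldl max a := by
  rw [List.foldl_map, List.foldl_filter]
  congr 1
  funext x y
  simp only [decide_eq_true_eq]
  by_cases hm : c + y ≤ money
  · simp only [if_pos hm, max_def]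
    split_ifs <;> omega
  · simp [hm]

-- the per-chair steps of A and B agree, for any sorted copy ds of desks
lemma step_eq_aux (money c a : Int) (desks ds : List Int)
    (hs : ds.Pairwise (fun x y => x ≤ y)) (hmem : ∀ x, x ∈ ds ↔ x ∈ desks) :
    desks.foldl (fun answer desk =>
        let price := c + desk
        if answer ≤ price ∧ price ≤ money then price else answer) a
      = (if bsearch ds (money - c) 0 ds.length > 0 then
           (if a < c + ds.getD (bsearch ds (money - c) 0 ds.length - 1) 0
            then c + ds.getD (bsearch ds (money - c) 0 ds.length - 1) 0 else a)
         else a) := by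
  obtain ⟨h0, hle, hall, hgt⟩ :=
    bsearch_spec ds (money - c) hs ds.length 0 ds.length (by omega) (by omega) (le_refl _)
  generalize hlo : bsearch ds (money - c) 0 ds.length = lo at *
  rw [innerA_eq_filter]
  rcases Nat.eq_zero_or_pos lo with hz | hpos
  · have hfil : desks.filter (fun d => decide (c + d ≤ money)) = [] := by
      rw [List.filter_eq_nil_iff]
      intro d hd
      simp only [decide_eq_true_eq]
      have hd' : d ∈ ds := (hmem d).mpr hd
      obtain ⟨i, hi, rfl⟩ := List.mem_iff_getElem.mp hd'
      have := hgt i (by omega) hi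
      rw [List.getD_eq_getElem _ _ hi] at this
      omega
    rw [hfil, if_neg (by omega)]
    rfl
  · have hlt : lo - 1 < ds.length := by omega
    have hmds : ds.getD (lo - 1) 0 ∈ ds := by
      rw [List.getD_eq_getElem _ _ hlt]; exact List.getElem_mem hlt
    have hmle : c + ds.getD (lo - 1) 0 ≤ money := by
      have := hall (lo - 1) (by omega) (by omega); omega
    have hmemmap : c + ds.getD (lo - 1) 0
        ∈ (desks.filter (fun d => decide (c + d ≤ money))).map (fun d => c + d) :=
      List.mem_map.mpr ⟨ds.getD (lo - 1) 0,
        List.mem_filter.mpr ⟨(hmem _).mp hmds, by simpa using hmle⟩, rfl⟩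
    have hdomi : ∀ x ∈ (desks.filter (fun d => decide (c + d ≤ money))).map (fun d => c + d),
        x ≤ c + ds.getD (lo - 1) 0 := by
      intro x hx
      obtain ⟨d, hdf, rfl⟩ := List.mem_map.mp hx
      obtain ⟨hdmem, hdle⟩ := List.mem_filter.mp hdf
      simp only [decide_eq_true_eq] at hdle
      have hd' : d ∈ ds := (hmem d).mpr hdmem
      obtain ⟨i, hi, hdi⟩ := List.mem_iff_getElem.mp hd'
      by_cases hilo : i < lo
      · have := getD_mono ds hs (show i ≤ lo - 1 by omega) hlt
        rw [List.getD_eq_getElem _ _ hi, hdi] at this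
        omega
      · exfalso
        have := hgt i (by omega) hi
        rw [List.getD_eq_getElem _ _ hi, hdi] at this
        omega
    rw [foldl_max_dom _ a _ hmemmap hdomi, if_pos hpos, max_def]
    split_ifs <;> omega

-- instantiated at ds = sorted desks (the form of B's step)
lemma step_eq (money c a : Int) (desks : List Int) :
    desks.foldl (fun answer desk =>
        let price := c + desk
        if answer ≤ price ∧ price ≤ money then price else answer) a
      = (let ds := PySem.List.sorted desks (fun x => x) false
         let lo := bsearch ds (money - c) 0 ds.length
         if lo > 0 then
           let p := c + ds.getD (lo - 1) 0
           if a < p then p else a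
         else a) :=
  step_eq_aux money c a desks (PySem.List.sorted desks (fun x => x) false)
    (PySem.List.sorted_pairwise desks (fun x => x))
    (fun x => PySem.List.mem_sorted desks (fun y => y) false x)

-- ===== VERDICT (by name: the statement is the Claim_ definition above) =====
theorem solution_spec : Claim_equal_solution := by
  intro money chairs desks _
  unfold Spec_solution solution solution_alt
  congr 1
  funext a c
  exact step_eq money c a desks
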